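-- pv_equiv track=rewrite | github.com/Akash-Sathish8/Arceo | backend/authority/graph.py | _is_read_only
-- ===== SOURCE A (Python) =====
-- READ_PREFIXES = ("get_", "list_", "read_", "search_", "query_", "check_",
--                  "describe_", "fetch_", "lookup_", "find_", "show_")
--
-- def _is_read_only(action_name: str) -> bool:
--     """Check if an action is read-only, handling service-prefixed names.
--
--     Handles both 'get_customer' and 'stripe_get_customer'.
--     """
--     lower = action_name.lower()
--     # Direct match
--     if lower.startswith(READ_PREFIXES):
--         return True
--     # Service-prefixed: stripe_get_customer, netsuite_get_customer_balance
--     parts = lower.split("_", 1)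
--     if len(parts) == 2 and parts[1].startswith(READ_PREFIXES):
--         return True
--     # Deeper prefix: aws_ec2_describe_instances
--     for i in range(len(lower)):
--         if lower[i] == "_":
--             rest = lower[i + 1:]
--             if rest.startswith(READ_PREFIXES):
--                 return True
--     return False
-- ===== SOURCE B (Python) =====
-- # B: prefix-driven rewrite — lowercase once, then for each read prefix test
-- # startswith(p) or substring '_'+p, instead of scanning every character position.
-- READ_PREFIXES = ("get_", "list_", "read_", "search_", "query_", "check_",
--                  "describe_", "fetch_", "lookup_", "find_", "show_")
--
-- def _is_read_only(action_name: str) -> bool: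
--     lower = action_name.lower()
--     for p in READ_PREFIXES:
--         if lower.startswith(p) or ("_" + p) in lower:
--             return True
--     return False
-- ===== Notes on version B (the rewrite author's own statement) =====
-- stated objective: idiomatic
-- what changed: Instead of checking startswith, then split on the first underscore, then scanning every character position for an underscore and re-testing all prefixes after each one, B lowercases once and for each prefix tests startswith or substring containment of underscore-plus-prefix (an occurrence of a prefix right after an underscore is exactly such a substring occurrence).
import Mathlib
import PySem

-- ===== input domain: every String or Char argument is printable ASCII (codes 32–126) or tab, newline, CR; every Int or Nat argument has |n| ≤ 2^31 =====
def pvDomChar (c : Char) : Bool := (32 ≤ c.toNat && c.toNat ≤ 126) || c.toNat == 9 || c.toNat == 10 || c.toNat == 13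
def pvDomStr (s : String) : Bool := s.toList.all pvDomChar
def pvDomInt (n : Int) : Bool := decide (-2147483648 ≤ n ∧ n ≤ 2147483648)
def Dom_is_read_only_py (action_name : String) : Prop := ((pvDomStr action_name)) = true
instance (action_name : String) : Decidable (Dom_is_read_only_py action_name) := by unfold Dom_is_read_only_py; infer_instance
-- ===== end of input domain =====

-- B replaces A's per-position '_' scan (plus redundant split('_',1) check) by one
-- startswith-or-substring('_'+p) test per read prefix; same results, more idiomatic.


-- ===== PORT A =====
-- module constant READ_PREFIXES (shared by both Pythons)
def readPrefixes : List (List Char) :=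
  ["get_".toList, "list_".toList, "read_".toList, "search_".toList, "query_".toList,
   "check_".toList, "describe_".toList, "fetch_".toList, "lookup_".toList,
   "find_".toList, "show_".toList]

def is_read_only_py (action_name : String) : Bool :=
  let lower := PySem.Chars.lower action_name.toList
  if readPrefixes.any (fun p => PySem.Chars.startswith lower p) then true
  else
    let parts := (PySem.Chars.splitMax? lower ['_'] 1).getD []
    if parts.length == 2 && readPrefixes.any (fun p => PySem.Chars.startswith (parts.getD 1 []) p) then true
    else
      (PySem.List.pyRange 0 (PySem.Chars.len lower) 1).any (fun i =>
        (PySem.Chars.pyGet? lower i == some '_') &&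
        readPrefixes.any (fun p => PySem.Chars.startswith (PySem.Chars.slice lower (some (i+1)) none) p))

-- ===== PORT B =====
def is_read_only_py_alt (action_name : String) : Bool :=
  let lower := PySem.Chars.lower action_name.toList
  readPrefixes.any (fun p =>
    PySem.Chars.startswith lower p || PySem.Chars.isIn ('_' :: p) lower)

-- ===== PRECONDITION & SPEC =====
def Spec_is_read_only_py (action_name : String) (out : Bool) : Prop := out = is_read_only_py_alt action_name
instance (action_name : String) (out : Bool) : Decidable (Spec_is_read_only_py action_name out) := by unfold Spec_is_read_only_py; infer_instance

-- ===== CLAIM (what is proved, stated in full; the proofs are below) =====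
def Claim_equal_is_read_only_py : Prop := ∀ (action_name : String), Dom_is_read_only_py action_name → Spec_is_read_only_py action_name (is_read_only_py action_name)

-- ===== LEMMAS AND PROOFS =====

-- splitOnMax.go with maxsplit budget 0 returns the rest as the final piece
lemma go_zero (fuel : Nat) (l : List Char) (acc : List (List Char)) :
    PySem.Chars.splitOnMax.go ['_'] fuel 0 l [] acc = (l :: acc).reverse := by
  cases fuel <;> cases l <;> simp [PySem.Chars.splitOnMax.go]

-- splitOnMax.go with budget 1 splits at the first '_' (if any)
lemma go_one (l : List Char) (fuel : Nat) (cur : List Char) (acc : List (List Char))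
    (h : l.length < fuel) :
    PySem.Chars.splitOnMax.go ['_'] fuel 1 l cur acc =
      if '_' ∈ l then
        acc.reverse ++ [cur.reverse ++ l.takeWhile (· ≠ '_'), (l.dropWhile (· ≠ '_')).tail]
      else acc.reverse ++ [cur.reverse ++ l] := by
  induction l generalizing fuel cur acc with
  | nil =>
      cases fuel with
      | zero => omega
      | succ f => simp [PySem.Chars.splitOnMax.go]
  | cons c rest ih =>
      cases fuel with
      | zero => omega
      | succ f =>
        by_cases hc : c = '_'
        · subst hc
          simp only [PySem.Chars.splitOnMax.go, List.isPrefixOf, List.mem_cons]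
          simp [go_zero]
        · have hlen : rest.length < f := by simpa using h
          simp only [PySem.Chars.splitOnMax.go]
          rw [if_neg (by simp), if_neg (by simp [List.isPrefixOf]; intro h; exact hc h.symm)]
          rw [ih _ _ _ hlen]
          by_cases hm : '_' ∈ rest <;> simp [hm, hc, Ne.symm hc]

-- lower.split("_", 1) evaluated: split at the first underscore
lemma split_underscore (cs : List Char) :
    (PySem.Chars.splitMax? cs ['_'] 1).getD [] =
      if '_' ∈ cs then [cs.takeWhile (· ≠ '_'), (cs.dropWhile (· ≠ '_')).tail]
      else [cs] := by
  have : ¬ ((1 : Int) < 0) := by norm_num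
  simp only [PySem.Chars.splitMax?, PySem.Chars.splitOnMax, List.isEmpty_cons, if_neg this,
    Option.getD_some, if_false, Bool.false_eq_true]
  rw [show (1 : Int).toNat = 1 from rfl, go_one cs (cs.length + 1) [] [] (by omega)]
  split <;> simp

lemma dropWhile_mem_underscore (cs : List Char) (h : '_' ∈ cs) :
    cs.dropWhile (· ≠ '_') = '_' :: (cs.dropWhile (· ≠ '_')).tail := by
  induction cs with
  | nil => simp at h
  | cons c rest ih =>
      by_cases hc : c = '_'
      · subst hc; simp
      · simp only [List.dropWhile_cons]
        rw [if_pos (by simp [hc])]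
        rcases List.mem_cons.mp h with h' | h'
        · exact absurd h'.symm hc
        · exact ih h'

-- '_'++p occurs as a substring of cs iff p starts right after some '_' in cs
lemma infix_underscore_iff (p cs : List Char) :
    ('_' :: p) <:+: cs ↔ ∃ j : Nat, ∃ hj : j < cs.length, cs[j] = '_' ∧ p <+: cs.drop (j + 1) := by
  constructor
  · intro h
    obtain ⟨j, hpre⟩ := (PySem.Chars.exists_prefix_drop_iff_isIn ('_' :: p) cs).mpr
      ((PySem.Chars.isIn_iff_infix _ _).mpr h)
    have hj : j < cs.length := by
      by_contra hge
      rw [List.drop_eq_nil_of_le (by omega)] at hpre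
      exact absurd (List.eq_nil_of_prefix_nil hpre) (by simp)
    rw [List.drop_eq_getElem_cons hj, List.cons_prefix_cons] at hpre
    exact ⟨j, hj, hpre.1.symm, hpre.2⟩
  · rintro ⟨j, hj, hc, hp⟩
    refine (PySem.Chars.isIn_iff_infix _ _).mp ?_
    refine (PySem.Chars.exists_prefix_drop_iff_isIn _ _).mp ⟨j, ?_⟩
    rw [List.drop_eq_getElem_cons hj, List.cons_prefix_cons]
    exact ⟨hc.symm, hp⟩

-- the redundant split("_",1) branch of A is subsumed by substring occurrence
lemma split_branch_infix (p cs : List Char) (hmem : '_' ∈ cs)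
    (hp : p <+: (cs.dropWhile (· ≠ '_')).tail) : ('_' :: p) <:+: cs := by
  have hd : cs.dropWhile (· ≠ '_') = '_' :: (cs.dropWhile (· ≠ '_')).tail :=
    dropWhile_mem_underscore cs hmem
  have hpre : ('_' :: p) <+: cs.dropWhile (· ≠ '_') := by
    rw [hd]; exact (List.cons_prefix_cons).mpr ⟨rfl, hp⟩
  exact hpre.isInfix.trans (List.dropWhile_suffix _).isInfix

-- the per-position loop of A is exactly substring occurrence of '_'++p
lemma loop_iff_infix (cs : List Char) :
    ((PySem.List.pyRange 0 (PySem.Chars.len cs) 1).any (fun i =>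
        (PySem.Chars.pyGet? cs i == some '_') &&
        readPrefixes.any (fun p => PySem.Chars.startswith (PySem.Chars.slice cs (some (i+1)) none) p)) = true)
    ↔ ∃ p ∈ readPrefixes, ('_' :: p) <:+: cs := by
  simp only [List.any_eq_true, Bool.and_eq_true, beq_iff_eq,
    PySem.Chars.pyGet?_eq_listPyGet?, PySem.Chars.slice_eq_listSlice, PySem.Chars.len_eq,
    PySem.List.mem_pyRange_one, PySem.Chars.startswith_iff]
  constructor
  · rintro ⟨i, ⟨hi0, hilen⟩, hget, p, hpmem, hpre⟩
    obtain ⟨n, rfl⟩ := Int.eq_ofNat_of_zero_le hi0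
    rw [PySem.List.pyGet?_natCast] at hget
    obtain ⟨hn, hc⟩ := List.getElem?_eq_some_iff.mp hget
    rw [show ((n : Int) + 1) = ((n + 1 : Nat) : Int) by push_cast; ring,
      PySem.List.slice_from_natCast] at hpre
    exact ⟨p, hpmem, (infix_underscore_iff p cs).mpr ⟨n, hn, hc, hpre⟩⟩
  · rintro ⟨p, hpmem, hinf⟩
    obtain ⟨j, hj, hc, hp⟩ := (infix_underscore_iff p cs).mp hinf
    refine ⟨(j : Int), ⟨by positivity, by exact_mod_cast hj⟩, ?_, p, hpmem, ?_⟩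
    · rw [PySem.List.pyGet?_natCast]; exact List.getElem?_eq_some_iff.mpr ⟨hj, hc⟩
    · rw [show ((j : Int) + 1) = ((j + 1 : Nat) : Int) by push_cast; ring,
        PySem.List.slice_from_natCast]
      exact hp

-- A's three-branch body equals B's single pass, for any (lowercased) character list
lemma body_eq (cs : List Char) :
    (if readPrefixes.any (fun p => PySem.Chars.startswith cs p) then true
     else
       let parts := (PySem.Chars.splitMax? cs ['_'] 1).getD []
       if parts.length == 2 && readPrefixes.any (fun p => PySem.Chars.startswith (parts.getD 1 []) p) then true
       else
         (PySem.List.pyRange 0 (PySem.Chars.len cs) 1).any (fun i =>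
           (PySem.Chars.pyGet? cs i == some '_') &&
           readPrefixes.any (fun p => PySem.Chars.startswith (PySem.Chars.slice cs (some (i+1)) none) p)))
    = readPrefixes.any (fun p =>
        PySem.Chars.startswith cs p || PySem.Chars.isIn ('_' :: p) cs) := by
  rw [Bool.eq_iff_iff]
  simp only [List.any_eq_true, Bool.or_eq_true, PySem.Chars.startswith_iff,
    PySem.Chars.isIn_iff_infix]
  by_cases hsw : ∃ p ∈ readPrefixes, p <+: cs
  · rw [if_pos hsw]
    obtain ⟨p, hm, hp⟩ := hsw
    simp only [true_iff]
    exact ⟨p, hm, Or.inl hp⟩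
  · rw [if_neg hsw]
    simp only [split_underscore]
    by_cases hmem : '_' ∈ cs
    · rw [if_pos hmem]
      by_cases hsb : ∃ p ∈ readPrefixes, p <+: (cs.dropWhile (· ≠ '_')).tail
      · rw [if_pos (by
          simp only [List.length_cons, List.length_nil, beq_self_eq_true, Bool.true_and,
            List.any_eq_true, PySem.Chars.startswith_iff, List.getD_cons_succ, List.getD_cons_zero]
          exact hsb)]
        obtain ⟨p, hm, hp⟩ := hsb
        simp only [true_iff]
        exact ⟨p, hm, Or.inr (split_branch_infix p cs hmem hp)⟩
      · rw [if_neg (by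
          simp only [List.length_cons, List.length_nil, beq_self_eq_true, Bool.true_and,
            List.any_eq_true, PySem.Chars.startswith_iff, List.getD_cons_succ, List.getD_cons_zero]
          exact hsb)]
        rw [loop_iff_infix cs]
        constructor
        · rintro ⟨p, hm, hinf⟩; exact ⟨p, hm, Or.inr hinf⟩
        · rintro ⟨p, hm, h⟩
          rcases h with h | h
          · exact absurd ⟨p, hm, h⟩ hsw
          · exact ⟨p, hm, h⟩
    · rw [if_neg hmem, if_neg (by simp)]
      rw [loop_iff_infix cs]
      constructor
      · rintro ⟨p, hm, hinf⟩; exact ⟨p, hm, Or.inr hinf⟩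
      · rintro ⟨p, hm, h⟩
        rcases h with h | h
        · exact absurd ⟨p, hm, h⟩ hsw
        · exact ⟨p, hm, h⟩

-- ===== VERDICT (by name: the statement is the Claim_ definition above) =====
theorem is_read_only_py_spec : Claim_equal_is_read_only_py := by
  intro action_name _
  unfold Spec_is_read_only_py is_read_only_py is_read_only_py_alt
  exact body_eq (PySem.Chars.lower action_name.toList)
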